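-- pv_equiv track=rewrite | github.com/TemsyChen/CS-Unit-1-Sprint-1-CS-Fundamentals | CS111_codesignal.py | csSquareAllDigits
-- ===== SOURCE A (Python) =====
-- def csSquareAllDigits(n):
--     n_string = str(n)
--     n_list = list(n_string)
--     n_squared = []
--     for elem in n_list:
--         elem = int(elem)
--         elem = elem**2
--         n_squared.append(elem)
--     n_squared_str = [str(n) for n in n_squared]
--     joined_str = "".join(n_squared_str)
--     joined_int = int(joined_str)
--     return joined_int
-- ===== SOURCE B (Python) =====
-- def csSquareAllDigits(n):
--     # place-value arithmetic: peel the last digit, square it, and attach it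
--     # to the recursively-built number by shifting 1 or 2 decimal places
--     # (a squared digit is at most 81, so it has exactly 1 or 2 digits)
--     if n < 10:
--         return n * n
--     sq = (n % 10) ** 2
--     return csSquareAllDigits(n // 10) * (10 if sq < 10 else 100) + sq
-- ===== Notes on version B (the rewrite author's own statement) =====
-- stated objective: alternative
-- what changed: A stringifies n, squares each digit via int()/str() round-trips, joins the pieces and re-parses the result; B never touches strings: it peels digits off the integer with % and // and reassembles the squared digits by place-value arithmetic (shifting by 10 or 100 since a squared digit has 1 or 2 decimal digits).
import Mathlib
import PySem

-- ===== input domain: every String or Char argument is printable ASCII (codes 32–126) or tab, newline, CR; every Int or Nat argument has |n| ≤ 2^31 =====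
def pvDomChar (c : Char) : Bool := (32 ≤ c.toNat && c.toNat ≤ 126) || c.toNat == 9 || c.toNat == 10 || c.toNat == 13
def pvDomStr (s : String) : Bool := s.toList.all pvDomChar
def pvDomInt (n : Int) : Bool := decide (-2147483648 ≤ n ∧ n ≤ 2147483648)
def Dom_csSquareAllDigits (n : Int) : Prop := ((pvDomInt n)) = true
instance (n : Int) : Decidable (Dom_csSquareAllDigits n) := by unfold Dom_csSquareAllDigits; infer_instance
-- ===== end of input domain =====

-- B squares each digit by place-value arithmetic on the integer itself (no strings); return values proven equal to A's on n ≥ 0 (A raises ValueError on negative n).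

-- ===== PORT A =====
-- the for-loop over list(str(n)): int(elem) may raise (none); squares are accumulated back-to-front exactly as A appends
def pvLoopA : List String → List Int → Option (List Int)
  | [], acc => some acc
  | e :: rest, acc =>
    match PySem.Int.ofStr? e with
    | none => none
    | some v => pvLoopA rest (acc ++ [v ^ 2])

def csSquareAllDigits (n : Int) : Int :=
  let nString := PySem.Int.toStr n
  let nList := nString.toList.map (fun c => String.ofList [c])
  match pvLoopA nList [] with
  | none => 0  -- Python raises ValueError here (int('-') on the sign of a negative n); outside Pre_
  | some nSquared =>
    let nSquaredStr := nSquared.map PySem.Int.toStr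
    let joinedStr := PySem.Str.join "" nSquaredStr
    match PySem.Int.ofStr? joinedStr with
    | none => 0  -- unreachable: a join of str(d*d) pieces is always a valid int literal
    | some v => v

-- ===== PORT B =====
def csSquareAllDigits_alt (n : Int) : Int :=
  if h : n < 10 then n * n
  else
    let sq := (PySem.Int.mod n 10) ^ 2
    csSquareAllDigits_alt (PySem.Int.floordiv n 10) * (if sq < 10 then 10 else 100) + sq
termination_by n.toNat
decreasing_by
  rw [PySem.Int.floordiv_eq_ediv_of_pos (by norm_num)]
  omega

-- ===== PRECONDITION & SPEC =====
-- Pre_ excludes negative n, on which A raises ValueError (int('-') on the minus sign).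
def Pre_csSquareAllDigits (n : Int) : Prop := 0 ≤ n
instance (n : Int) : Decidable (Pre_csSquareAllDigits n) := by unfold Pre_csSquareAllDigits; infer_instance
def pvWitness_csSquareAllDigits : Int := 4021

def Spec_csSquareAllDigits (n : Int) (out : Int) : Prop := out = csSquareAllDigits_alt n
instance (n : Int) (out : Int) : Decidable (Spec_csSquareAllDigits n out) := by unfold Spec_csSquareAllDigits; infer_instance

-- ===== CLAIM (what is proved, stated in full; the proofs are below) =====
def Claim_equal_csSquareAllDigits : Prop := ∀ (n : Int), Dom_csSquareAllDigits n → Pre_csSquareAllDigits n → Spec_csSquareAllDigits n (csSquareAllDigits n)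

-- ===== LEMMAS AND PROOFS =====

/- mirror of the (private) digit-string parser inside `PySem.Int.ofChars?`; proved to agree
   with it on the fly (via `congrFun` and definitional reduction) in `pv_ofChars_digits` -/
def pvGo : List Char → Bool → Nat → Option Nat
  | [], afterDigit, acc => if afterDigit = true then some acc else none
  | c :: rest, afterDigit, acc =>
    if c.isDigit = true then pvGo rest true (acc * 10 + (c.toNat - '0'.toNat))
    else
      if c = '_' ∧ afterDigit = true then
        match rest with
        | d :: _ => if d.isDigit = true then pvGo rest false acc else none
        | [] => none
      else none

def pvDigitsVal? (x : List Char) : Option Nat :=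
  match x with
  | [] => none
  | cs => pvGo cs false 0

/-- decimal value of a digit string -/
def pvVal (ds : List Char) : Nat := ds.foldl (fun a c => a * 10 + (c.toNat - 48)) 0

/-- the digits of the square of the digit encoded by `c` -/
def pvSq (c : Char) : List Char := Nat.toDigits 10 ((c.toNat - 48) * (c.toNat - 48))

/-- the joined digit string A builds for input `m` -/
def pvJ (m : Nat) : List Char := ((Nat.toDigits 10 m).map pvSq).flatten

theorem pv_digit_not_space {c : Char} (h : c.isDigit = true) : PySem.Int.isIntSpace c = false := by
  simp only [Char.isDigit] at h
  simp only [PySem.Int.isIntSpace, Bool.or_eq_false_iff, decide_eq_false_iff_not]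
  refine ⟨⟨⟨⟨⟨?_, ?_⟩, ?_⟩, ?_⟩, ?_⟩, ?_⟩ <;> (intro he; subst he; simp at h)

theorem pv_ofChars_digits (c : Char) (ds : List Char) (hc : c.isDigit = true)
    (hds : ∀ x ∈ ds, x.isDigit = true) :
    PySem.Int.ofChars? (c :: ds) =
      Option.map (fun n : Int => n) (do let a ← pvDigitsVal? (c :: ds); pure ((a : Int))) := by
  unfold PySem.Int.ofChars?
  have hall : ∀ x ∈ ds.reverse ++ [c], PySem.Int.isIntSpace x = false := by
    intro x hx
    rcases List.mem_append.mp hx with hx | hx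
    · exact pv_digit_not_space (hds _ (List.mem_reverse.mp hx))
    · rw [List.mem_singleton.mp hx]
      exact pv_digit_not_space hc
  rw [List.dropWhile_cons_of_neg (by simp [pv_digit_not_space hc])]
  rw [show (c :: ds).reverse = ds.reverse ++ [c] by simp]
  rw [List.dropWhile_eq_self_iff.mpr (by
    intro hl
    have := hall _ (List.getElem_mem hl)
    simp [this])]
  rw [show (ds.reverse ++ [c]).reverse = c :: ds by simp]
  dsimp only
  split
  case h_1 ds2 heq =>
    rw [List.cons.injEq] at heq
    rw [heq.1] at hc
    simp at hc
  case h_2 ds2 heq =>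
    rw [List.cons.injEq] at heq
    rw [heq.1] at hc
    simp at hc
  case h_3 =>
    congr 1
    congr 1
    refine congrFun ?_ (c :: ds)
    conv_lhs => whnf
    funext x
    cases x with
    | nil => rfl
    | cons c1 cs1 =>
      dsimp only
      rw [show pvDigitsVal? (c1 :: cs1) = pvGo (c1 :: cs1) false 0 from rfl]
      refine congrFun (congrFun (congrFun ?_ (c1 :: cs1)) false) 0
      funext l b a
      induction l generalizing b a with
      | nil => cases b <;> rfl
      | cons c2 tail IH =>
        conv_lhs => whnf
        rw [pvGo.eq_def]
        dsimp only
        cases hc2 : c2.isDigit with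
        | true => exact IH _ _
        | false =>
          conv_lhs => whnf
          by_cases hcb : c2 = '_' ∧ b = true
          · obtain ⟨hce, hbe⟩ := hcb
            subst hce; subst hbe
            rw [if_neg Bool.false_ne_true, if_pos ⟨rfl, rfl⟩]
            conv_lhs => whnf
            cases tail with
            | nil => rfl
            | cons d t2 =>
              dsimp only
              cases hd : d.isDigit with
              | true => exact IH _ _
              | false => rfl
          · rw [if_neg Bool.false_ne_true, if_neg hcb]
            cases hI : (instDecidableAnd : Decidable (c2 = '_' ∧ b = true)) with
            | isTrue hp => exact absurd hp hcb
            | isFalse hp => rfl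


theorem pvGo_digits : ∀ (ds : List Char) (a : Nat), (∀ x ∈ ds, x.isDigit = true) →
    pvGo ds true a = some (ds.foldl (fun a c => a * 10 + (c.toNat - 48)) a) := by
  intro ds
  induction ds with
  | nil => intro a _; rfl
  | cons c tail IH =>
    intro a h
    rw [pvGo.eq_def]
    dsimp only
    rw [if_pos (h c List.mem_cons_self)]
    rw [IH _ (fun x hx => h x (List.mem_cons_of_mem _ hx))]
    rfl

/-- parsing a nonempty all-digit string yields its decimal value -/
theorem pv_parse (c : Char) (ds : List Char) (hc : c.isDigit = true)
    (hds : ∀ x ∈ ds, x.isDigit = true) :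
    PySem.Int.ofChars? (c :: ds) = some ((pvVal (c :: ds) : Nat) : Int) := by
  rw [pv_ofChars_digits c ds hc hds]
  rw [show pvDigitsVal? (c :: ds) = pvGo (c :: ds) false 0 from rfl]
  rw [pvGo.eq_def]
  dsimp only
  rw [if_pos hc, pvGo_digits _ _ hds]
  rfl

-- `Nat.toDigitsCore`: accumulator shifts out, and the fuel is irrelevant once sufficient
theorem pv_tdc_acc : ∀ (f n : Nat) (acc : List Char),
    Nat.toDigitsCore 10 f n acc = Nat.toDigitsCore 10 f n [] ++ acc := by
  intro f
  induction f with
  | zero => intro n acc; rfl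
  | succ f IH =>
    intro n acc
    rw [Nat.toDigitsCore]
    by_cases h : n / 10 = 0
    · rw [Nat.toDigitsCore]
      simp [h]
    · conv_rhs => rw [Nat.toDigitsCore]
      simp only [h, if_false]
      rw [IH (n / 10) ((n % 10).digitChar :: acc), IH (n / 10) [(n % 10).digitChar]]
      simp

theorem pv_tdc_fuel : ∀ (n f f' : Nat), n < f → n < f' →
    Nat.toDigitsCore 10 f n [] = Nat.toDigitsCore 10 f' n [] := by
  intro n
  induction n using Nat.strong_induction_on with
  | _ n IH =>
    intro f f' hf hf'
    obtain ⟨g, rfl⟩ : ∃ g, f = g + 1 := ⟨f - 1, by omega⟩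
    obtain ⟨g', rfl⟩ : ∃ g', f' = g' + 1 := ⟨f' - 1, by omega⟩
    rw [Nat.toDigitsCore, Nat.toDigitsCore]
    by_cases h : n / 10 = 0
    · simp [h]
    · simp only [h, if_false]
      rw [pv_tdc_acc g, pv_tdc_acc g']
      have hlt : n / 10 < n := Nat.div_lt_self (by omega) (by norm_num)
      rw [IH (n / 10) hlt g g' (by omega) (by omega)]

theorem pv_toDigits_lt {m : Nat} (h : m < 10) : Nat.toDigits 10 m = [m.digitChar] := by
  rw [Nat.toDigits, Nat.toDigitsCore]
  have h0 : m / 10 = 0 := Nat.div_eq_of_lt h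
  have h1 : m % 10 = m := Nat.mod_eq_of_lt h
  simp [h0, h1]

theorem pv_toDigits_ge {m : Nat} (h : 10 ≤ m) :
    Nat.toDigits 10 m = Nat.toDigits 10 (m / 10) ++ [(m % 10).digitChar] := by
  rw [Nat.toDigits, Nat.toDigitsCore]
  have h0 : ¬ m / 10 = 0 := by
    have := Nat.div_le_div_right (c := 10) h
    simp at this
    omega
  simp only [h0, if_false]
  rw [pv_tdc_acc]
  rw [pv_tdc_fuel (m / 10) m (m / 10 + 1) (by
      have : m / 10 < m := Nat.div_lt_self (by omega) (by norm_num)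
      omega) (by omega)]
  rfl

theorem pv_digitChar_isDigit {r : Nat} (h : r < 10) : r.digitChar.isDigit = true := by
  interval_cases r <;> decide

theorem pv_digitChar_val {r : Nat} (h : r < 10) : r.digitChar.toNat - 48 = r := by
  interval_cases r <;> decide

theorem pv_toDigits_digits (m : Nat) : ∀ c ∈ Nat.toDigits 10 m, c.isDigit = true := by
  induction m using Nat.strong_induction_on with
  | _ m IH =>
    by_cases h : m < 10
    · rw [pv_toDigits_lt h]
      intro c hcm
      rw [List.mem_singleton.mp hcm]
      exact pv_digitChar_isDigit h
    · rw [pv_toDigits_ge (by omega)]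
      intro c hcm
      rcases List.mem_append.mp hcm with hcm | hcm
      · exact IH (m / 10) (Nat.div_lt_self (by omega) (by norm_num)) c hcm
      · rw [List.mem_singleton.mp hcm]
        exact pv_digitChar_isDigit (Nat.mod_lt _ (by norm_num))

theorem pv_toDigits_ne_nil (m : Nat) : Nat.toDigits 10 m ≠ [] := by
  by_cases h : m < 10
  · rw [pv_toDigits_lt h]; simp
  · rw [pv_toDigits_ge (by omega)]; simp

theorem pv_foldl_init : ∀ (ds : List Char) (a : Nat),
    ds.foldl (fun a c => a * 10 + (c.toNat - 48)) a = a * 10 ^ ds.length + pvVal ds := by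
  intro ds
  induction ds with
  | nil => intro a; simp [pvVal]
  | cons c tail IH =>
    intro a
    show List.foldl _ (a * 10 + (c.toNat - 48)) tail = _
    rw [IH]
    unfold pvVal
    show _ = a * 10 ^ (tail.length + 1) + List.foldl _ (0 * 10 + (c.toNat - 48)) tail
    rw [IH (0 * 10 + (c.toNat - 48))]
    unfold pvVal
    ring

theorem pv_val_append (xs ys : List Char) :
    pvVal (xs ++ ys) = pvVal xs * 10 ^ ys.length + pvVal ys := by
  unfold pvVal
  rw [List.foldl_append]
  rw [pv_foldl_init ys]
  rfl

theorem pv_roundtrip (m : Nat) : pvVal (Nat.toDigits 10 m) = m := by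
  induction m using Nat.strong_induction_on with
  | _ m IH =>
    by_cases h : m < 10
    · rw [pv_toDigits_lt h]
      unfold pvVal
      simp [pv_digitChar_val h]
    · rw [pv_toDigits_ge (by omega), pv_val_append]
      rw [IH (m / 10) (Nat.div_lt_self (by omega) (by norm_num))]
      have hr : m % 10 < 10 := Nat.mod_lt _ (by norm_num)
      unfold pvVal
      simp only [List.length_singleton, List.foldl_cons, List.foldl_nil]
      rw [pv_digitChar_val hr]
      omega

theorem pv_join_flatten : ∀ parts : List (List Char), PySem.Chars.join [] parts = parts.flatten := by
  intro parts
  induction parts with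
  | nil => exact PySem.Chars.join_nil []
  | cons p ps IH =>
    cases ps with
    | nil => simp [PySem.Chars.join_singleton]
    | cons q qs =>
      rw [PySem.Chars.join_cons_cons, IH]
      simp

theorem pv_loop : ∀ (cs : List Char), (∀ x ∈ cs, x.isDigit = true) → ∀ (acc : List Int),
    pvLoopA (cs.map (fun c => String.ofList [c])) acc
      = some (acc ++ cs.map (fun c => ((c.toNat - 48 : Nat) : Int) ^ 2)) := by
  intro cs
  induction cs with
  | nil => intro _ acc; simp [pvLoopA]
  | cons c tail IH =>
    intro h acc
    rw [List.map_cons, pvLoopA]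
    have h1 : PySem.Int.ofStr? (String.ofList [c]) = some ((c.toNat - 48 : Nat) : Int) := by
      have : PySem.Int.ofStr? (String.ofList [c]) = PySem.Int.ofChars? [c] := by
        simp [PySem.Int.ofStr?]
      rw [this, pv_parse c [] (h c List.mem_cons_self) (by intro x hx; simp at hx)]
      simp [pvVal]
    rw [h1]
    dsimp only
    rw [IH (fun x hx => h x (List.mem_cons_of_mem _ hx))]
    simp

theorem pv_sq_chars (c : Char) :
    (PySem.Int.toStr (((c.toNat - 48 : Nat) : Int) ^ 2)).toList = pvSq c := by
  rw [PySem.Int.toList_toStr]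
  have hcast : (((c.toNat - 48 : Nat) : Int) ^ 2) = (((c.toNat - 48) * (c.toNat - 48) : Nat) : Int) := by
    push_cast
    ring
  rw [hcast]
  unfold pvSq
  simp only [PySem.Int.toChars]
  rw [if_neg (not_lt.mpr (Int.natCast_nonneg _))]
  rw [Int.toNat_natCast]

theorem pv_J_digits (m : Nat) : ∀ x ∈ pvJ m, x.isDigit = true := by
  intro x hx
  unfold pvJ at hx
  rcases List.mem_flatten.mp hx with ⟨l, hl, hxl⟩
  rcases List.mem_map.mp hl with ⟨c, _, rfl⟩
  exact pv_toDigits_digits _ x hxl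

theorem pv_J_ne_nil (m : Nat) : pvJ m ≠ [] := by
  unfold pvJ
  rcases List.exists_cons_of_ne_nil (pv_toDigits_ne_nil m) with ⟨c, cs, hc⟩
  rw [hc, List.map_cons, List.flatten_cons]
  intro hcon
  rcases List.append_eq_nil_iff.mp hcon with ⟨h1, _⟩
  exact pv_toDigits_ne_nil _ h1

theorem pv_hA (m : Nat) : csSquareAllDigits (m : Int) = ((pvVal (pvJ m) : Nat) : Int) := by
  unfold csSquareAllDigits
  have hchars : (PySem.Int.toStr (m : Int)).toList = Nat.toDigits 10 m := by
    rw [PySem.Int.toList_toStr]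
    simp [PySem.Int.toChars]
  dsimp only
  rw [hchars]
  rw [pv_loop (Nat.toDigits 10 m) (pv_toDigits_digits m) []]
  dsimp only
  rw [List.nil_append]
  have hjoined : (PySem.Str.join "" ((List.map (fun c => ((c.toNat - 48 : Nat) : Int) ^ 2) (Nat.toDigits 10 m)).map PySem.Int.toStr)).toList = pvJ m := by
    rw [PySem.Str.toList_join]
    rw [show ("" : String).toList = [] from rfl]
    rw [pv_join_flatten]
    rw [List.map_map, List.map_map]
    unfold pvJ
    congr 1
    apply List.map_congr_left
    intro c _
    exact pv_sq_chars c
  have hparse : PySem.Int.ofStr? (PySem.Str.join "" ((List.map (fun c => ((c.toNat - 48 : Nat) : Int) ^ 2) (Nat.toDigits 10 m)).map PySem.Int.toStr)) = some ((pvVal (pvJ m) : Nat) : Int) := by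
    have : PySem.Int.ofStr? (PySem.Str.join "" ((List.map (fun c => ((c.toNat - 48 : Nat) : Int) ^ 2) (Nat.toDigits 10 m)).map PySem.Int.toStr)) = PySem.Int.ofChars? (pvJ m) := by
      simp only [PySem.Int.ofStr?]
      rw [hjoined]
    rw [this]
    rcases List.exists_cons_of_ne_nil (pv_J_ne_nil m) with ⟨c, cs, hc⟩
    rw [hc]
    rw [pv_parse c cs (pv_J_digits m c (hc ▸ List.mem_cons_self))
      (fun x hx => pv_J_digits m x (hc ▸ List.mem_cons_of_mem _ hx))]
  rw [hparse]

theorem pv_sq_val {r : Nat} (h : r < 10) :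
    pvVal (pvSq r.digitChar) = r * r ∧ (pvSq r.digitChar).length = (if r * r < 10 then 1 else 2) := by
  unfold pvSq
  rw [pv_digitChar_val h]
  refine ⟨pv_roundtrip _, ?_⟩
  by_cases h2 : r * r < 10
  · rw [if_pos h2, pv_toDigits_lt h2]
    rfl
  · rw [if_neg h2, pv_toDigits_ge (by omega)]
    have hq : r * r / 10 < 10 := by interval_cases r <;> omega
    rw [pv_toDigits_lt hq]
    rfl

theorem pv_hB (m : Nat) : csSquareAllDigits_alt (m : Int) = ((pvVal (pvJ m) : Nat) : Int) := by
  induction m using Nat.strong_induction_on with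
  | _ m IH =>
    by_cases h : m < 10
    · rw [csSquareAllDigits_alt]
      rw [dif_pos (by exact_mod_cast h)]
      unfold pvJ
      rw [pv_toDigits_lt h]
      rw [List.map_cons, List.map_nil, List.flatten_cons, List.flatten_nil, List.append_nil]
      rw [(pv_sq_val h).1]
      push_cast
      ring
    · rw [csSquareAllDigits_alt]
      rw [dif_neg (by exact_mod_cast h)]
      dsimp only
      have hmod : PySem.Int.mod (m : Int) 10 = ((m % 10 : Nat) : Int) := by
        rw [PySem.Int.mod_eq_emod_of_pos (by norm_num)]
        push_cast
        rfl
      have hdiv : PySem.Int.floordiv (m : Int) 10 = ((m / 10 : Nat) : Int) := by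
        rw [PySem.Int.floordiv_eq_ediv_of_pos (by norm_num)]
        push_cast
        rfl
      rw [hmod, hdiv]
      rw [IH (m / 10) (Nat.div_lt_self (by omega) (by norm_num))]
      have hJ : pvJ m = pvJ (m / 10) ++ pvSq ((m % 10).digitChar) := by
        unfold pvJ
        rw [pv_toDigits_ge (by omega)]
        rw [List.map_append, List.flatten_append]
        simp
      rw [hJ, pv_val_append]
      have hr : m % 10 < 10 := Nat.mod_lt _ (by norm_num)
      obtain ⟨hv, hl⟩ := pv_sq_val hr
      rw [hv, hl]
      have hcastsq : (((m % 10 : Nat) : Int)) ^ 2 = (((m % 10) * (m % 10) : Nat) : Int) := by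
        push_cast
        ring
      rw [hcastsq]
      by_cases h2 : (m % 10) * (m % 10) < 10
      · rw [if_pos h2, if_pos (by exact_mod_cast h2)]
        push_cast
        ring
      · rw [if_neg h2, if_neg (by exact_mod_cast h2)]
        push_cast
        ring

-- ===== VERDICT (by name: the statement is the Claim_ definition above) =====
theorem csSquareAllDigits_spec : Claim_equal_csSquareAllDigits := by
  intro n _ hpre
  unfold Spec_csSquareAllDigits
  have hm : n = ((n.toNat : Nat) : Int) := (Int.toNat_of_nonneg hpre).symm
  rw [hm, pv_hA, pv_hB]
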